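-- pv_equiv track=rewrite | github.com/pkoopongithub/ARS_ExplainableAI | ARSXAI3.py | count_transitions
-- ===== SOURCE A (Python) =====
-- def count_transitions(chains):
--     transitions = {}
--     for chain in chains:
--         for i in range(len(chain) - 1):
--             start, end = chain[i], chain[i + 1]
--             if start not in transitions:
--                 transitions[start] = {}
--             if end not in transitions[start]:
--                 transitions[start][end] = 0
--             transitions[start][end] += 1
--     return transitions
-- ===== SOURCE B (Python) =====
-- def count_transitions(chains):
--     # Pass 1: one flat table counting each (start, end) pair.
--     flat = {}
--     for chain in chains:
--         for start, end in zip(chain, chain[1:]):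
--             flat[(start, end)] = flat.get((start, end), 0) + 1
--     # Pass 2: pivot the flat table into the nested dict-of-dicts.
--     result = {}
--     for (start, end), count in flat.items():
--         result.setdefault(start, {})[end] = count
--     return result
-- ===== Notes on version B (the rewrite author's own statement) =====
-- stated objective: alternative
-- what changed: Replaces A's on-the-fly nested-dict updates with two passes: a single flat dict keyed by (start, end) counts all transitions, then a pivot pass rebuilds the nested dict from the flat table.
import Mathlib
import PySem

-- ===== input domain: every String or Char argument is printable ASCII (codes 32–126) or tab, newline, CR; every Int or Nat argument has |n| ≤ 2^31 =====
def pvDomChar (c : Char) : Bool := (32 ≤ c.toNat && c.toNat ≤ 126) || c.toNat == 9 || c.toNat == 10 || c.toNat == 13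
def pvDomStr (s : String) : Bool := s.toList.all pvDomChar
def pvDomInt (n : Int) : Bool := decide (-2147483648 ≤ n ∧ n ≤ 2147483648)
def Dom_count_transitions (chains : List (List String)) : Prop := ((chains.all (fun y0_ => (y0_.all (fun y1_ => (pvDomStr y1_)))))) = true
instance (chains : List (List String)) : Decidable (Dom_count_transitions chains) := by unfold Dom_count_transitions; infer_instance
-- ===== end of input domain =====

-- B replaces A's on-the-fly nested-dict updates by a flat (start, end) counter plus a pivot pass (objective: alternative decomposition, same cost).

-- ===== PORT A =====
-- A builds the nested dict directly while scanning each chain by index.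
def count_transitions (chains : List (List String)) : List (String × List (String × Int)) :=
  let transitions :=
    chains.foldl (fun transitions chain =>
      (PySem.List.pyRange 0 ((chain.length : Int) - 1)).foldl (fun transitions i =>
        -- i ranges over range(len(chain) - 1), always in bounds, so the "" defaults are never used
        let start := PySem.List.pyGetD chain i ""
        let stop  := PySem.List.pyGetD chain (i + 1) ""
        let t1 := if transitions.contains start then transitions
                  else transitions.insert start PySem.Dict.empty
        let inner := t1.getD start PySem.Dict.empty
        let inner1 := if inner.contains stop then inner else inner.insert stop 0
        t1.insert start (inner1.insert stop (inner1.getD stop 0 + 1))) transitions)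
      (PySem.Dict.empty : PySem.Dict String (PySem.Dict String Int))
  transitions.items.map (fun p => (p.1, p.2.items))

-- ===== PORT B =====
-- B: pass 1 counts every (start, end) pair in one flat dict; pass 2 pivots the flat items into the nested dict.
def count_transitions_alt (chains : List (List String)) : List (String × List (String × Int)) :=
  let flat :=
    chains.foldl (fun flat chain =>
      (chain.zip (PySem.List.slice chain (some 1) none)).foldl (fun flat p =>
        flat.insert p (flat.getD p 0 + 1)) flat)
      (PySem.Dict.empty : PySem.Dict (String × String) Int)
  let result :=
    flat.items.foldl (fun result q =>
      result.modify q.1.1 PySem.Dict.empty (fun inner => inner.insert q.1.2 q.2))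
      (PySem.Dict.empty : PySem.Dict String (PySem.Dict String Int))
  result.items.map (fun p => (p.1, p.2.items))

-- ===== PRECONDITION & SPEC =====
def Spec_count_transitions (chains : List (List String)) (out : List (String × List (String × Int))) : Prop := out = count_transitions_alt chains
instance (chains : List (List String)) (out : List (String × List (String × Int))) : Decidable (Spec_count_transitions chains out) := by unfold Spec_count_transitions; infer_instance

-- ===== CLAIM (what is proved, stated in full; the proofs are below) =====
def Claim_equal_count_transitions : Prop := ∀ (chains : List (List String)), Dom_count_transitions chains → Spec_count_transitions chains (count_transitions chains)

-- ===== LEMMAS AND PROOFS =====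

-- the list of adjacent pairs of all chains, in scan order
def pvPairs (chains : List (List String)) : List (String × String) :=
  chains.flatMap (fun c => c.zip c.tail)

-- A's loop body, as a function of the (start, end) pair
def pvStepA (t : PySem.Dict String (PySem.Dict String Int)) (p : String × String) :
    PySem.Dict String (PySem.Dict String Int) :=
  let t1 := if t.contains p.1 then t else t.insert p.1 PySem.Dict.empty
  let inner := t1.getD p.1 PySem.Dict.empty
  let inner1 := if inner.contains p.2 then inner else inner.insert p.2 0
  t1.insert p.1 (inner1.insert p.2 (inner1.getD p.2 0 + 1))

-- A's loop body in normalised single-insert form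
def pvStepN (t : PySem.Dict String (PySem.Dict String Int)) (p : String × String) :
    PySem.Dict String (PySem.Dict String Int) :=
  t.insert p.1 ((t.getD p.1 PySem.Dict.empty).insert p.2 ((t.getD p.1 PySem.Dict.empty).getD p.2 0 + 1))

-- B's pivot body
def pvPivot (r : PySem.Dict String (PySem.Dict String Int)) (q : (String × String) × Int) :
    PySem.Dict String (PySem.Dict String Int) :=
  r.modify q.1.1 PySem.Dict.empty (fun inner => inner.insert q.1.2 q.2)

lemma pvStepA_eq_stepN (t : PySem.Dict String (PySem.Dict String Int)) (p : String × String) :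
    pvStepA t p = pvStepN t p := by
  unfold pvStepA pvStepN
  by_cases h : t.contains p.1 = true
  · simp only [h, if_true]
    by_cases h2 : (t.getD p.1 PySem.Dict.empty).contains p.2 = true
    · simp [h2]
    · simp only [Bool.not_eq_true] at h2
      simp [h2, PySem.Dict.getD_insert_self, PySem.Dict.getD_of_not_contains _ _ h2,
        PySem.Dict.insert_insert_self]
  · simp only [Bool.not_eq_true] at h
    simp [h, PySem.Dict.getD_insert_self, PySem.Dict.getD_of_not_contains _ _ h,
      PySem.Dict.insert_insert_self, PySem.Dict.contains_empty, PySem.Dict.getD_empty]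

lemma pvZipRange (c : List String) :
    (List.range (c.length - 1)).map (fun k => (c.getD k "", c.getD (k + 1) "")) = c.zip c.tail := by
  induction c with
  | nil => simp
  | cons x c' ih =>
    cases c' with
    | nil => simp
    | cons y t =>
      simp only [List.length_cons, Nat.add_sub_cancel, List.range_succ_eq_map, List.map_cons,
        List.map_map, List.zip_cons_cons, List.tail_cons, List.getD_cons_succ,
        List.getD_cons_zero] at ih ⊢
      exact congrArg _ ih

lemma pvFoldInnerA {δ : Type} (g : δ → (String × String) → δ) (c : List String) (t : δ) :
    (PySem.List.pyRange 0 ((c.length : Int) - 1)).foldl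
      (fun t i => g t (PySem.List.pyGetD c i "", PySem.List.pyGetD c (i + 1) "")) t
    = (c.zip c.tail).foldl g t := by
  cases c with
  | nil => rfl
  | cons x c' =>
    rw [show (((x :: c').length : Int) - 1) = ((c'.length : Nat) : Int) by simp,
      PySem.List.pyRange_zero_natCast, List.foldl_map]
    have h2 : (fun (t : δ) (k : Nat) =>
          g t (PySem.List.pyGetD (x :: c') (k : Int) "", PySem.List.pyGetD (x :: c') ((k : Int) + 1) ""))
        = fun t k => g t ((x :: c').getD k "", (x :: c').getD (k + 1) "") := by
      funext t k
      rw [PySem.List.pyGetD_natCast, show ((k : Int) + 1) = ((k + 1 : Nat) : Int) by push_cast; ring,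
        PySem.List.pyGetD_natCast]
    rw [h2, ← List.foldl_map,
      show c'.length = (x :: c').length - 1 from rfl, pvZipRange]

lemma pvA_norm (chains : List (List String)) :
    count_transitions chains
    = ((pvPairs chains).foldl pvStepN PySem.Dict.empty).items.map (fun p => (p.1, p.2.items)) := by
  have hAN : pvStepA = pvStepN := funext fun t => funext fun p => pvStepA_eq_stepN t p
  have hA : ∀ (chain : List String) (t : PySem.Dict String (PySem.Dict String Int)),
      (PySem.List.pyRange 0 ((chain.length : Int) - 1)).foldl (fun transitions i =>
        let start := PySem.List.pyGetD chain i ""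
        let stop  := PySem.List.pyGetD chain (i + 1) ""
        let t1 := if transitions.contains start then transitions
                  else transitions.insert start PySem.Dict.empty
        let inner := t1.getD start PySem.Dict.empty
        let inner1 := if inner.contains stop then inner else inner.insert stop 0
        t1.insert start (inner1.insert stop (inner1.getD stop 0 + 1))) t
      = (chain.zip chain.tail).foldl pvStepN t := by
    intro c t
    rw [show (fun (transitions : PySem.Dict String (PySem.Dict String Int)) (i : Int) =>
        let start := PySem.List.pyGetD c i ""
        let stop  := PySem.List.pyGetD c (i + 1) ""
        let t1 := if transitions.contains start then transitions
                  else transitions.insert start PySem.Dict.empty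
        let inner := t1.getD start PySem.Dict.empty
        let inner1 := if inner.contains stop then inner else inner.insert stop 0
        t1.insert start (inner1.insert stop (inner1.getD stop 0 + 1)))
      = (fun t i => pvStepA t (PySem.List.pyGetD c i "", PySem.List.pyGetD c (i + 1) ""))
      from rfl]
    rw [pvFoldInnerA, hAN]
  simp only [count_transitions, hA]
  rw [pvPairs, List.foldl_flatMap]

lemma pvB_norm (chains : List (List String)) :
    count_transitions_alt chains
    = (((PySem.Dict.counter (pvPairs chains)).items.foldl pvPivot PySem.Dict.empty).items.map
        (fun p => (p.1, p.2.items))) := by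
  have hflat : (chains.foldl (fun f chain =>
        (chain.zip (PySem.List.slice chain (some 1) none)).foldl
          (fun f p => f.insert p (f.getD p 0 + 1)) f)
        (PySem.Dict.empty : PySem.Dict (String × String) Int))
      = PySem.Dict.counter (pvPairs chains) := by
    have hs : ∀ c : List String, PySem.List.slice c (some 1) none = c.tail := by
      intro c
      rw [PySem.List.slice_from c (by norm_num : (0 : Int) ≤ 1)]
      simp [List.drop_one]
    simp only [hs]
    rw [← PySem.Dict.foldl_insert_getD_add_one_eq_counter, pvPairs, List.foldl_flatMap]
  simp only [count_transitions_alt, hflat]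
  rfl

-- getD characterisation of A's nested fold: the inner dict at s is the counter loop over the ends of s
lemma pvTA_getD (ps : List (String × String)) (d : PySem.Dict String (PySem.Dict String Int)) (s : String) :
    (ps.foldl pvStepN d).getD s PySem.Dict.empty
    = ((ps.filter (fun p => p.1 == s)).map Prod.snd).foldl
        (fun i e => i.insert e (i.getD e 0 + 1)) (d.getD s PySem.Dict.empty) := by
  induction ps generalizing d with
  | nil => simp
  | cons p ps ih =>
    rw [List.foldl_cons, ih, List.filter_cons]
    by_cases h : p.1 = s
    · subst h
      simp only [beq_self_eq_true, if_true, List.map_cons, List.foldl_cons]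
      congr 1
      rw [pvStepN, PySem.Dict.getD_insert]
      simp
    · have hb : (p.1 == s) = false := by simp [h]
      simp only [hb, Bool.false_eq_true, if_false]
      congr 1
      rw [pvStepN, PySem.Dict.getD_insert, if_neg (fun hh : s = p.1 => h hh.symm)]

-- getD characterisation of B's pivot fold
lemma pvPV_getD (L : List ((String × String) × Int)) (r : PySem.Dict String (PySem.Dict String Int)) (s : String) :
    (L.foldl pvPivot r).getD s PySem.Dict.empty
    = (L.filter (fun q => q.1.1 == s)).foldl (fun i q => i.insert q.1.2 q.2)
        (r.getD s PySem.Dict.empty) := by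
  induction L generalizing r with
  | nil => simp
  | cons q L ih =>
    rw [List.foldl_cons, ih, List.filter_cons]
    by_cases h : q.1.1 = s
    · subst h
      simp only [beq_self_eq_true, if_true, List.foldl_cons]
      congr 1
      rw [pvPivot, PySem.Dict.getD_modify]
      simp
    · have hb : (q.1.1 == s) = false := by simp [h]
      simp only [hb, Bool.false_eq_true, if_false]
      congr 1
      rw [pvPivot, PySem.Dict.getD_modify, if_neg (fun hh : s = q.1.1 => h hh.symm)]

-- ordered dedup commutes with a map taken after it
lemma pvOfList_map {α β : Type} [BEq α] [LawfulBEq α] [BEq β] [LawfulBEq β] (f : α → β) (l : List α) :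
    PySem.Set.ofList ((PySem.Set.ofList l).map f) = PySem.Set.ofList (l.map f) := by
  induction l using List.reverseRecOn with
  | nil => rfl
  | append_singleton l x ih =>
    have hadd : ∀ {γ : Type} [BEq γ] (m : List γ) (y : γ),
        PySem.Set.ofList (m ++ [y]) = PySem.Set.add (PySem.Set.ofList m) y := by
      intro γ _ m y
      simp [PySem.Set.ofList, List.foldl_append]
    rw [List.map_append, List.map_singleton, hadd, hadd]
    by_cases hx : x ∈ l
    · have h1 : PySem.Set.add (PySem.Set.ofList l) x = PySem.Set.ofList l := by
        simp [PySem.Set.add, PySem.Set.mem_ofList, hx]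
      have h2 : PySem.Set.add (PySem.Set.ofList (l.map f)) (f x) = PySem.Set.ofList (l.map f) := by
        simp [PySem.Set.add, PySem.Set.mem_ofList,
          List.mem_map_of_mem (f := f) hx]
      rw [h1, h2, ih]
    · have h1 : PySem.Set.add (PySem.Set.ofList l) x = PySem.Set.ofList l ++ [x] := by
        simp [PySem.Set.add, PySem.Set.mem_ofList, hx]
      rw [h1, List.map_append, List.map_singleton, hadd, ih]

-- dedup of pairs restricted to first component s, projected to second components
lemma pvOfList_filter_snd (s : String) (ps : List (String × String)) :
    ((PySem.Set.ofList ps).filter (fun k => k.1 == s)).map Prod.snd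
    = PySem.Set.ofList ((ps.filter (fun k => k.1 == s)).map Prod.snd) := by
  induction ps using List.reverseRecOn with
  | nil => rfl
  | append_singleton ps x ih =>
    have hadd : ∀ {γ : Type} [BEq γ] (m : List γ) (y : γ),
        PySem.Set.ofList (m ++ [y]) = PySem.Set.add (PySem.Set.ofList m) y := by
      intro γ _ m y
      simp [PySem.Set.ofList, List.foldl_append]
    by_cases hx : x ∈ ps
    · have h1 : PySem.Set.ofList (ps ++ [x]) = PySem.Set.ofList ps := by
        rw [hadd]
        simp [PySem.Set.add, PySem.Set.mem_ofList, hx]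
      rw [h1, ih, List.filter_append]
      by_cases h2 : x.1 = s
      · have hxf : x ∈ ps.filter (fun k => k.1 == s) :=
          List.mem_filter.mpr ⟨hx, by simp [h2]⟩
        have hx2 : x.2 ∈ (ps.filter (fun k => k.1 == s)).map Prod.snd :=
          List.mem_map_of_mem hxf
        rw [show List.filter (fun k => k.1 == s) [x] = [x] by simp [h2]]
        rw [List.map_append, List.map_singleton, hadd]
        simp [PySem.Set.add, PySem.Set.mem_ofList, hx2]
      · rw [show List.filter (fun k => k.1 == s) [x] = [] by simp [h2]]
        simp
    · have h1 : PySem.Set.ofList (ps ++ [x]) = PySem.Set.ofList ps ++ [x] := by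
        rw [hadd]
        simp [PySem.Set.add, PySem.Set.mem_ofList, hx]
      rw [h1, List.filter_append, List.filter_append]
      by_cases h2 : x.1 = s
      · have hnot : x.2 ∉ (ps.filter (fun k => k.1 == s)).map Prod.snd := by
          intro hmem
          obtain ⟨y, hy, hy2⟩ := List.mem_map.mp hmem
          have hy1 : y.1 = s := by simpa using (List.mem_filter.mp hy).2
          have hyx : y = x := Prod.ext (hy1.trans h2.symm) hy2
          exact hx (hyx ▸ (List.mem_filter.mp hy).1)
        rw [show List.filter (fun k => k.1 == s) [x] = [x] by simp [h2]]
        rw [List.map_append, List.map_singleton, List.map_append, List.map_singleton, hadd, ih]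
        simp [PySem.Set.add, PySem.Set.mem_ofList, hnot]
      · rw [show List.filter (fun k => k.1 == s) [x] = [] by simp [h2]]
        simp [ih]

lemma pvCount_pairs (s e : String) (ps : List (String × String)) :
    ps.count (s, e) = ((ps.filter (fun k => k.1 == s)).map Prod.snd).count e := by
  induction ps with
  | nil => simp
  | cons p ps ih =>
    obtain ⟨p1, p2⟩ := p
    by_cases h1 : p1 = s
    · subst h1
      simp [List.count_cons, ih, Prod.ext_iff]
    · simp [ih, h1, Prod.ext_iff]

lemma pvMain (ps : List (String × String)) :
    ((ps.foldl pvStepN PySem.Dict.empty).items.map (fun p => (p.1, p.2.items)))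
    = (((PySem.Dict.counter ps).items.foldl pvPivot PySem.Dict.empty).items.map
        (fun p => (p.1, p.2.items))) := by
  have hKA : (ps.foldl pvStepN PySem.Dict.empty).keys = PySem.Set.ofList (ps.map Prod.fst) :=
    PySem.Dict.keys_foldl_insert_key ps Prod.fst
      (fun d p => (d.getD p.1 PySem.Dict.empty).insert p.2
        ((d.getD p.1 PySem.Dict.empty).getD p.2 0 + 1)) PySem.Dict.empty
  have hKB : ((PySem.Dict.counter ps).items.foldl pvPivot PySem.Dict.empty).keys
      = PySem.Set.ofList (ps.map Prod.fst) := by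
    have h1 := PySem.Dict.keys_foldl_modify_key (PySem.Dict.counter ps).items
      (fun q => q.1.1) PySem.Dict.empty
      (fun _ q inner => inner.insert q.1.2 q.2) PySem.Dict.empty
    nth_rewrite 2 [PySem.Dict.items_counter] at h1
    rw [List.map_map] at h1
    exact h1.trans (pvOfList_map Prod.fst ps)
  have hNA : (ps.foldl pvStepN PySem.Dict.empty).keys.Nodup := by
    rw [hKA]; exact PySem.Set.nodup_ofList _
  have hNB : ((PySem.Dict.counter ps).items.foldl pvPivot PySem.Dict.empty).keys.Nodup := by
    rw [hKB]; exact PySem.Set.nodup_ofList _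
  have hInner : ∀ t : String,
      ((ps.foldl pvStepN PySem.Dict.empty).getD t PySem.Dict.empty).items
      = (((PySem.Dict.counter ps).items.foldl pvPivot PySem.Dict.empty).getD t
          PySem.Dict.empty).items := by
    intro t
    -- A side: the inner dict at t is the counter of the ends of t
    have hA : (ps.foldl pvStepN PySem.Dict.empty).getD t PySem.Dict.empty
        = PySem.Dict.counter ((ps.filter (fun p => p.1 == t)).map Prod.snd) := by
      rw [pvTA_getD, PySem.Dict.getD_empty,
        PySem.Dict.foldl_insert_getD_add_one_eq_counter]
    -- B side: the pivot writes the flat counts of the pairs starting with t, fresh keys in order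
    have hB : ((PySem.Dict.counter ps).items.foldl pvPivot PySem.Dict.empty).getD t
          PySem.Dict.empty
        = ((PySem.Set.ofList ps).filter (fun k => k.1 == t)).foldl
            (fun i k => i.insert k.2 ((ps.count k : Int))) PySem.Dict.empty := by
      rw [pvPV_getD, PySem.Dict.getD_empty, PySem.Dict.items_counter, List.filter_map,
        List.foldl_map]
      rfl
    rw [hA, hB, PySem.Dict.items_counter]
    rw [PySem.Dict.items_foldl_insert_fresh
      ((PySem.Set.ofList ps).filter (fun k => k.1 == t)) (fun k => k.2)
      (fun k => (ps.count k : Int))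
      PySem.Dict.empty (fun a _ => PySem.Dict.contains_empty a.2)
      (by rw [pvOfList_filter_snd]; exact PySem.Set.nodup_ofList _)]
    rw [show (PySem.Dict.empty : PySem.Dict String Int).items = [] from rfl, List.nil_append]
    have hcg : ((PySem.Set.ofList ps).filter (fun k => k.1 == t)).map
          (fun k => (k.2, (ps.count k : Int)))
        = ((PySem.Set.ofList ps).filter (fun k => k.1 == t)).map
          (fun k => (k.2, ((((ps.filter (fun p => p.1 == t)).map Prod.snd).count k.2 : Int)))) := by
      refine List.map_congr_left (fun k hk => ?_)
      have hk1 : k.1 = t := by simpa using (List.mem_filter.mp hk).2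
      have hke : k = (t, k.2) := Prod.ext hk1 rfl
      rw [hke, ← pvCount_pairs t k.2 ps]
    rw [hcg, show (fun (k : String × String) =>
          (k.2, ((((ps.filter (fun p => p.1 == t)).map Prod.snd).count k.2 : Int))))
        = (fun e => (e, ((((ps.filter (fun p => p.1 == t)).map Prod.snd).count e : Int))))
            ∘ Prod.snd from rfl,
      ← List.map_map, pvOfList_filter_snd]
  rw [PySem.Dict.items_eq_map_keys _ hNA PySem.Dict.empty,
    PySem.Dict.items_eq_map_keys _ hNB PySem.Dict.empty, hKA, hKB, List.map_map, List.map_map]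
  refine List.map_congr_left (fun t _ => ?_)
  simp only [Function.comp_apply]
  rw [hInner t]

-- ===== VERDICT (by name: the statement is the Claim_ definition above) =====
theorem count_transitions_spec : Claim_equal_count_transitions := by
  intro chains _
  show count_transitions chains = count_transitions_alt chains
  rw [pvA_norm, pvB_norm, pvMain]
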